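-- pv_equiv track=rewrite | github.com/lizhi16/CI-Crawler-Tools | crawl_devops_logs.py | resolve_repo_address
-- ===== SOURCE A (Python) =====
-- def resolve_repo_address(content):
--     repo_link = ""
--     author = ""
--     for line in content.split("\n"):
--         if "git clone --depth=50" in line:
--             repo_link = line.strip().rsplit(" ", 2)[1]
--             author = line.strip().rsplit(" ", 1)[1]
--
--     return repo_link, author
-- ===== SOURCE B (Python) =====
-- def resolve_repo_address(content):
--     MARK = "git clone --depth=50"
--     i = content.rfind(MARK)
--     if i == -1:
--         return "", ""
--     end = content.find("\n", i)
--     if end == -1: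
--         end = len(content)
--     start = content.rfind("\n", 0, i) + 1
--     line = content[start:end].strip()
--     j = line.rfind(" ")
--     k = line.rfind(" ", 0, j)
--     return line[k + 1:j], line[j + 1:]
-- ===== Notes on version B (the rewrite author's own statement) =====
-- stated objective: alternative
-- what changed: B never splits the text into a list of lines: it locates the last occurrence of the clone marker with rfind over the whole string, slices the enclosing line out between the surrounding newline positions found with find/rfind, and cuts the repo and author fields out with rfind on spaces, whereas A scans every line of content.split and re-parses with rsplit, overwriting the result, on each matching line.
import Mathlib
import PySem

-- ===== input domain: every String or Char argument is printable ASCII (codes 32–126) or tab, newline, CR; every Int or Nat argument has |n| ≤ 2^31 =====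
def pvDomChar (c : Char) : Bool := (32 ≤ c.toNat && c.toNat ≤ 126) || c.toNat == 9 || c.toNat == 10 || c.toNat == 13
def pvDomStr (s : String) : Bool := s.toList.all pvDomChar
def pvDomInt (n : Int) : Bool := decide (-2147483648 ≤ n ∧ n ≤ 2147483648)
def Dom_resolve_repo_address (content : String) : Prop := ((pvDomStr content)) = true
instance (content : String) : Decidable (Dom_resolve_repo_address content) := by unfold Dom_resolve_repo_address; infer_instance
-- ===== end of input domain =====

-- B replaces A's line-by-line scan by a direct substring search: rfind locates the LAST
-- occurrence of the clone marker in the whole text, the enclosing line is sliced out between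
-- the surrounding newlines, and the two fields are cut out with rfind on spaces (alternative
-- algorithm, same asymptotic cost).

-- ===== PORT A =====
-- hand port of s.rsplit(" ", maxsplit): split at the LAST space, recurse on the prefix.
-- Exact for maxsplit ≥ 0 (the only uses here are 1 and 2).
def rsplitSp : List Char → Nat → List (List Char)
  | cs, 0 => [cs]
  | cs, k + 1 =>
    if ' ' ∈ cs then
      let r := cs.reverse
      let j := r.idxOf ' '
      rsplitSp (r.drop (j + 1)).reverse k ++ [(r.take j).reverse]
    else [cs]

-- line.strip().rsplit(" ", 2)[1] and line.strip().rsplit(" ", 1)[1].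
-- List.getD 1 [] is exact here: Python's [1] never raises on the lines this is called on
-- (a matched line contains "git clone --depth=50", hence spaces, so rsplit yields ≥ 2 parts).
def parseClone (line : String) : String × String :=
  let s := (PySem.Str.strip line).toList
  (String.ofList ((rsplitSp s 2).getD 1 []), String.ofList ((rsplitSp s 1).getD 1 []))

-- content.split("\n"): split? is none only for sep = "", so .getD [] is exact here
def resolve_repo_address (content : String) : String × String :=
  ((PySem.Str.split? content "\n").getD []).foldl
    (fun acc line =>
      if PySem.Str.isIn "git clone --depth=50" line then parseClone line else acc)
    ("", "")

-- ===== PORT B =====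
def resolve_repo_address_alt (content : String) : String × String :=
  let i := PySem.Str.rfind content "git clone --depth=50"
  if i = -1 then ("", "")
  else
    let e0 := PySem.Str.findFrom content "\n" i
    let e := if e0 = -1 then PySem.Str.len content else e0
    let st := PySem.Str.rfindFrom content "\n" 0 (some i) + 1
    let line := PySem.Str.strip (PySem.Str.slice content (some st) (some e))
    let j := PySem.Str.rfind line " "
    let k := PySem.Str.rfindFrom line " " 0 (some j)
    (PySem.Str.slice line (some (k + 1)) (some j),
     PySem.Str.slice line (some (j + 1)) none)

-- ===== PRECONDITION & SPEC =====
def Spec_resolve_repo_address (content : String) (out : String × String) : Prop := out = resolve_repo_address_alt content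
instance (content : String) (out : String × String) : Decidable (Spec_resolve_repo_address content out) := by unfold Spec_resolve_repo_address; infer_instance

-- ===== CLAIM (what is proved, stated in full; the proofs are below) =====
def Claim_equal_resolve_repo_address : Prop := ∀ (content : String), Dom_resolve_repo_address content → Spec_resolve_repo_address content (resolve_repo_address content)

-- ===== LEMMAS AND PROOFS =====

lemma prefixChar_iff (t : List Char) (j : Nat) (c : Char) :
    ([c] <+: t.drop j) ↔ t[j]? = some c := by
  have hg : t[j]? = (t.drop j)[0]? := by
    rw [List.getElem?_drop, Nat.add_zero]
  rw [hg]
  cases h : t.drop j with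
  | nil => simp
  | cons a l => simp [List.cons_prefix_cons, eq_comm]

private lemma rgo_zero (s sub : List Char) :
    PySem.Chars.rfind.go s sub 0 = if sub.isPrefixOf s then (0:Int) else -1 := rfl

private lemma rgo_succ (s sub : List Char) (n : Nat) :
    PySem.Chars.rfind.go s sub (n+1) =
      if sub.isPrefixOf (s.drop (n+1)) then ((n+1 : Nat) : Int) else PySem.Chars.rfind.go s sub n := by
  rfl

lemma rgo_le (s sub : List Char) (x : Nat) : PySem.Chars.rfind.go s sub x ≤ x := by
  induction x with
  | zero => rw [rgo_zero]; split <;> simp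
  | succ n ih =>
      rw [rgo_succ]; split
      · simp
      · exact le_trans ih (by push_cast; omega)

lemma rgo_eq_neg_iff (s sub : List Char) (x : Nat) :
    PySem.Chars.rfind.go s sub x = -1 ↔ ∀ j : Nat, j ≤ x → ¬ sub <+: s.drop j := by
  induction x with
  | zero =>
      rw [rgo_zero]
      constructor
      · intro h j hj
        interval_cases j
        simp only [List.drop_zero]
        intro hp
        rw [← List.isPrefixOf_iff_prefix] at hp
        simp [hp] at h
      · intro h
        have := h 0 le_rfl
        rw [List.drop_zero, ← List.isPrefixOf_iff_prefix] at this
        simp only [Bool.not_eq_true] at this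
        simp [this]
  | succ n ih =>
      rw [rgo_succ]
      split
      · rename_i hp
        constructor
        · intro h; exfalso; omega
        · intro h; exact absurd (List.isPrefixOf_iff_prefix.mp hp) (h (n+1) le_rfl)
      · rename_i hp
        rw [ih]
        constructor
        · intro h j hj
          rcases Nat.lt_or_ge j (n+1) with h' | h'
          · exact h j (Nat.lt_succ_iff.mp h')
          · have : j = n+1 := by omega
            subst this
            rw [← List.isPrefixOf_iff_prefix]
            simpa using hp
        · intro h j hj; exact h j (Nat.le_succ_of_le hj)

lemma rgo_eq_coe_iff (s sub : List Char) (x k : Nat) (hk : k ≤ x) :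
    PySem.Chars.rfind.go s sub x = (k : Int) ↔
      sub <+: s.drop k ∧ ∀ j : Nat, k < j → j ≤ x → ¬ sub <+: s.drop j := by
  induction x with
  | zero =>
      have hk0 : k = 0 := Nat.le_zero.mp hk
      subst hk0
      rw [rgo_zero]
      by_cases hp : sub.isPrefixOf s
      · rw [if_pos hp]
        simp only [Nat.cast_zero]
        constructor
        · intro _
          exact ⟨by simpa using List.isPrefixOf_iff_prefix.mp hp, by omega⟩
        · intro _; exact trivial
      · rw [if_neg (by simpa using hp)]
        constructor
        · intro h; exact absurd h (by norm_num)
        · rintro ⟨h1, -⟩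
          rw [List.drop_zero, ← List.isPrefixOf_iff_prefix] at h1
          exact absurd h1 (by simpa using hp)
  | succ n ih =>
      rw [rgo_succ]
      by_cases hp : sub.isPrefixOf (s.drop (n+1))
      · rw [if_pos hp]
        constructor
        · intro h
          have : k = n+1 := by exact_mod_cast h.symm
          subst this
          exact ⟨List.isPrefixOf_iff_prefix.mp hp, by omega⟩
        · rintro ⟨h1, h2⟩
          rcases Nat.lt_or_ge k (n+1) with h' | h'
          · exact absurd (List.isPrefixOf_iff_prefix.mp hp) (h2 (n+1) h' le_rfl)
          · have : k = n+1 := by omega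
            subst this; rfl
      · rw [if_neg (by simpa using hp)]
        rcases Nat.lt_or_ge k (n+1) with h' | h'
        · rw [ih (by omega)]
          constructor
          · rintro ⟨h1, h2⟩
            refine ⟨h1, fun j hj hj2 => ?_⟩
            rcases Nat.lt_or_ge j (n+1) with h'' | h''
            · exact h2 j hj (by omega)
            · have : j = n+1 := by omega
              subst this
              rw [← List.isPrefixOf_iff_prefix]
              simpa using hp
          · rintro ⟨h1, h2⟩
            exact ⟨h1, fun j hj hj2 => h2 j hj (by omega)⟩
        · have hkn : k = n+1 := by omega
          subst hkn
          constructor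
          · intro h
            have := rgo_le s sub n
            rw [h] at this
            exfalso
            push_cast at this
            omega
          · rintro ⟨h1, -⟩
            rw [← List.isPrefixOf_iff_prefix] at h1
            exact absurd h1 (by simpa using hp)

lemma infix_iff_exists_drop (s sub : List Char) :
    sub <:+: s ↔ ∃ j, sub <+: s.drop j := by
  rw [← PySem.Chars.isIn_iff_infix, ← PySem.Chars.exists_prefix_drop_iff_isIn]

lemma rfind_eq_neg_iff (s sub : List Char) (hsub : sub ≠ []) :
    PySem.Chars.rfind s sub = -1 ↔ ¬ sub <:+: s := by
  rw [PySem.Chars.rfind, rgo_eq_neg_iff, infix_iff_exists_drop]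
  constructor
  · rintro h ⟨j, hj⟩
    rcases Nat.lt_or_ge s.length j with h' | h'
    · rw [List.drop_eq_nil_of_le (le_of_lt h')] at hj
      exact hsub (List.prefix_nil.mp hj)
    · exact h j h' hj
  · intro h j _ hj
    exact h ⟨j, hj⟩

lemma rfind_eq_coe_iff (s sub : List Char) (k : Nat) (hk : k ≤ s.length) :
    PySem.Chars.rfind s sub = (k : Int) ↔
      sub <+: s.drop k ∧ ∀ j : Nat, k < j → j ≤ s.length → ¬ sub <+: s.drop j := by
  exact rgo_eq_coe_iff s sub s.length k hk

lemma rgo_neg_le (s sub : List Char) (x : Nat) : -1 ≤ PySem.Chars.rfind.go s sub x := by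
  induction x with
  | zero => rw [rgo_zero]; split <;> omega
  | succ n ih => rw [rgo_succ]; split <;> [omega; exact ih]

lemma rfind_cases (s sub : List Char) :
    PySem.Chars.rfind s sub = -1 ∨ ∃ k : Nat, k ≤ s.length ∧ PySem.Chars.rfind s sub = (k : Int) := by
  have h1 : -1 ≤ PySem.Chars.rfind s sub := rgo_neg_le s sub s.length
  have h2 : PySem.Chars.rfind s sub ≤ (s.length : Int) := rgo_le s sub s.length
  rcases eq_or_lt_of_le h1 with h | h
  · exact Or.inl h.symm
  · right
    exact ⟨(PySem.Chars.rfind s sub).toNat, by omega, by omega⟩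

lemma singleton_infix_iff (w : List Char) (c : Char) : [c] <:+: w ↔ c ∈ w := by
  rw [infix_iff_exists_drop]
  constructor
  · rintro ⟨j, hj⟩
    exact List.mem_of_getElem? ((prefixChar_iff w j c).mp hj)
  · intro h
    obtain ⟨j, hjl, hj⟩ := List.mem_iff_getElem.mp h
    exact ⟨j, (prefixChar_iff w j c).mpr (by rw [List.getElem?_eq_getElem hjl, hj])⟩

lemma rfind_char_no (w : List Char) (c : Char) (h : c ∉ w) : PySem.Chars.rfind w [c] = -1 := by
  rw [rfind_eq_neg_iff w [c] (by simp)]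
  rw [singleton_infix_iff]
  exact h

lemma find_char_no (w : List Char) (c : Char) (h : c ∉ w) : PySem.Chars.find w [c] = -1 := by
  rw [PySem.Chars.find_eq_neg_one_iff, singleton_infix_iff]
  exact h

lemma getElem_append_sep_self (u v : List Char) (c : Char) :
    (u ++ c :: v)[u.length]? = some c := by
  rw [List.getElem?_append_right le_rfl]
  simp

lemma getElem_append_sep_right (u v : List Char) (c : Char) (j : Nat) (hj : u.length < j) :
    (u ++ c :: v)[j]? = v[j - u.length - 1]? := by
  rw [List.getElem?_append_right (by omega)]
  rw [show j - u.length = (j - u.length - 1) + 1 by omega]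
  simp

lemma rfind_char_last (u v : List Char) (c : Char) (hv : c ∉ v) :
    PySem.Chars.rfind (u ++ c :: v) [c] = (u.length : Int) := by
  rw [rfind_eq_coe_iff _ _ u.length (by simp)]
  constructor
  · rw [prefixChar_iff]
    exact getElem_append_sep_self u v c
  · intro j hj hjl hp
    rw [prefixChar_iff, getElem_append_sep_right u v c j hj] at hp
    exact hv (List.mem_of_getElem? hp)

lemma find_eq_coe_of (s sub : List Char) (k : Nat)
    (hpre : sub <+: s.drop k) (hmin : ∀ i : Nat, i < k → ¬ sub <+: s.drop i) :
    PySem.Chars.find s sub = (k : Int) := by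
  have hinf : sub <:+: s := (infix_iff_exists_drop s sub).mpr ⟨k, hpre⟩
  have h0 : 0 ≤ PySem.Chars.find s sub := (PySem.Chars.find_nonneg_iff s sub).mpr hinf
  obtain ⟨h1, h2⟩ := PySem.Chars.find_spec h0
  rcases Nat.lt_trichotomy (PySem.Chars.find s sub).toNat k with h | h | h
  · exact absurd h1 (hmin _ h)
  · omega
  · exact absurd hpre (h2 k h)

-- first '\n' in u ++ '\n'::v from index 0
lemma find_char_sep (u v : List Char) (c : Char) :
    PySem.Chars.find (u ++ c :: v) [c] =
      if c ∈ u then PySem.Chars.find u [c] else (u.length : Int) := by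
  split
  · rename_i hm
    have h0 : 0 ≤ PySem.Chars.find u [c] :=
      (PySem.Chars.find_nonneg_iff u [c]).mpr ((singleton_infix_iff u c).mpr hm)
    obtain ⟨h1, h2⟩ := PySem.Chars.find_spec h0
    set k := (PySem.Chars.find u [c]).toNat with hk
    have hkl : k < u.length := by
      rw [prefixChar_iff] at h1
      exact (List.getElem?_eq_some_iff.mp h1).1
    have : PySem.Chars.find (u ++ c :: v) [c] = (k : Int) := by
      apply find_eq_coe_of
      · rw [prefixChar_iff, List.getElem?_append_left hkl]
        rw [prefixChar_iff] at h1
        simpa using h1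
      · intro i hi hp
        rw [prefixChar_iff, List.getElem?_append_left (by omega)] at hp
        exact h2 i hi ((prefixChar_iff u i c).mpr hp)
    omega
  · rename_i hm
    apply find_eq_coe_of
    · rw [prefixChar_iff]
      exact getElem_append_sep_self u v c
    · intro i hi hp
      rw [prefixChar_iff, List.getElem?_append_left hi] at hp
      exact hm (List.mem_of_getElem? hp)

-- s.rfind(sub, 0, e) = rfind of the prefix of length e
lemma rfindFrom_zero_some (s sub : List Char) (e : Int) (h0 : 0 ≤ e) (hl : e ≤ (s.length : Int)) :
    PySem.Chars.rfindFrom s sub 0 (some e) = PySem.Chars.rfind (s.take e.toNat) sub := by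
  unfold PySem.Chars.rfindFrom
  split_ifs with h1 <;> simp_all
  rw [if_neg (by omega : ¬ ((s.length:Int) < e)), if_neg (by omega : ¬ (e < 0))]
  rw [if_neg (by omega : ¬ (e < (0:Int)))]
  split
  · rename_i h; rw [h]
  · rfl

-- the '\n'-segments of a char list (specification companion of Chars.splitOn s ['\n'])
def segs : List Char → List (List Char)
  | [] => [[]]
  | c :: r =>
    if c = '\n' then [] :: segs r
    else
      match segs r with
      | [] => [[c]]
      | s :: ss => (c :: s) :: ss

lemma segs_ne_nil (l : List Char) : segs l ≠ [] := by
  cases l with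
  | nil => simp [segs]
  | cons c r =>
      rw [segs]
      split
      · simp
      · split <;> simp

def modHead (p : List Char) : List (List Char) → List (List Char)
  | [] => [p]
  | s :: ss => (p ++ s) :: ss

lemma splitOn_go_eq (l : List Char) : ∀ (fuel : Nat) (cur : List Char) (acc : List (List Char)),
    l.length < fuel →
    PySem.Chars.splitOn.go ['\n'] fuel l cur acc = acc.reverse ++ modHead cur.reverse (segs l) := by
  induction l with
  | nil =>
      intro fuel cur acc hf
      obtain ⟨f, rfl⟩ : ∃ f, fuel = f + 1 := ⟨fuel - 1, by omega⟩
      simp [PySem.Chars.splitOn.go, segs, modHead]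
  | cons c r ih =>
      intro fuel cur acc hf
      obtain ⟨f, rfl⟩ : ∃ f, fuel = f + 1 := ⟨fuel - 1, by omega⟩
      by_cases hc : c = '\n'
      · subst hc
        have hpre : ['\n'].isPrefixOf ('\n' :: r) = true := by simp [List.isPrefixOf]
        rw [show PySem.Chars.splitOn.go ['\n'] (f+1) ('\n' :: r) cur acc
              = PySem.Chars.splitOn.go ['\n'] f (List.drop 1 ('\n' :: r)) [] (cur.reverse :: acc) from by
            simp [PySem.Chars.splitOn.go, hpre]]
        rw [List.drop_one, List.tail_cons]
        rw [ih f [] (cur.reverse :: acc) (by simp at hf ⊢; omega)]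
        rw [segs, if_pos rfl]
        rcases hs : segs r with _ | ⟨s, ss⟩
        · exact absurd hs (segs_ne_nil r)
        · simp [modHead]
      · have hpre : ['\n'].isPrefixOf (c :: r) = false := by
          simp [List.isPrefixOf]
          intro h; exact absurd h.symm hc
        rw [show PySem.Chars.splitOn.go ['\n'] (f+1) (c :: r) cur acc
              = PySem.Chars.splitOn.go ['\n'] f r (c :: cur) acc from by
            simp [PySem.Chars.splitOn.go, hpre]]
        rw [ih f (c :: cur) acc (by simp at hf ⊢; omega)]
        rw [segs, if_neg hc]
        rcases hs : segs r with _ | ⟨s, ss⟩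
        · exact absurd hs (segs_ne_nil r)
        · simp [modHead]

lemma splitOn_eq_segs (cs : List Char) : PySem.Chars.splitOn cs ['\n'] = segs cs := by
  rw [PySem.Chars.splitOn, splitOn_go_eq cs (cs.length + 1) [] [] (by omega)]
  rcases hs : segs cs with _ | ⟨s, ss⟩
  · exact absurd hs (segs_ne_nil cs)
  · simp [modHead]

lemma segs_no_newline (s : List Char) (h : '\n' ∉ s) : segs s = [s] := by
  induction s with
  | nil => rfl
  | cons c r ih =>
      simp only [List.mem_cons, not_or] at h
      rw [segs, if_neg (show ¬ c = '\n' from fun he => h.1 he.symm), ih h.2]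

lemma segs_append (u v : List Char) (hv : '\n' ∉ v) :
    segs (u ++ '\n' :: v) = segs u ++ [v] := by
  induction u with
  | nil =>
      simp only [List.nil_append]
      simp [segs, segs_no_newline v hv]
  | cons c u' ih =>
      by_cases hc : c = '\n'
      · subst hc
        simp only [List.cons_append]
        simp [segs, ih]
      · simp only [List.cons_append]
        rw [segs, if_neg hc, ih]
        conv_rhs => rw [segs, if_neg hc]
        rcases hs : segs u' with _ | ⟨s, ss⟩
        · exact absurd hs (segs_ne_nil u')
        · rfl

def msl : List Char := ['g','i','t',' ','c','l','o','n','e',' ','-','-','d','e','p','t','h','=','5','0']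

lemma msl_eq : "git clone --depth=50".toList = msl := by decide

-- index of the LAST space, via idxOf on the reverse (A's formulation)

def jnat (w : List Char) : Nat := w.length - 1 - w.reverse.idxOf ' '

lemma idxOf_le_getElem (l : List Char) (c : Char) (i : Nat) (hi : i < l.length) (h : l[i] = c) :
    l.idxOf c ≤ i := by
  have hml : c ∈ l := by rw [List.mem_iff_getElem]; exact ⟨i, hi, h⟩
  have hmem : c ∈ l.take (i+1) := by
    rw [List.mem_iff_getElem]
    refine ⟨i, by simp [hi], ?_⟩
    rw [List.getElem_take]
    exact h
  have := (List.mem_take_iff_idxOf_lt hml).mp hmem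
  omega

lemma rfind_space_eq (w : List Char) (hm : ' ' ∈ w) :
    PySem.Chars.rfind w [' '] = ((jnat w : Nat) : Int) := by
  have hmr : ' ' ∈ w.reverse := by simpa using hm
  have hjr : w.reverse.idxOf ' ' < w.length := by
    have := List.idxOf_lt_length_of_mem hmr
    simpa using this
  have hget : w.reverse[w.reverse.idxOf ' ']'(by simpa using hjr) = ' ' :=
    List.getElem_idxOf (by simpa using hjr)
  rw [List.getElem_reverse] at hget
  have hjn : jnat w < w.length := by unfold jnat; omega
  rw [rfind_eq_coe_iff w [' '] (jnat w) (le_of_lt hjn)]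
  refine ⟨?_, ?_⟩
  · rw [prefixChar_iff, List.getElem?_eq_getElem hjn]
    simp only [Option.some_inj]
    have hidx : jnat w = w.length - 1 - w.reverse.idxOf ' ' := rfl
    rw [show w[jnat w] = w[w.length - 1 - w.reverse.idxOf ' ']'(by omega) from by congr 1]
    exact hget
  · intro j hj hjl hp
    rw [prefixChar_iff] at hp
    have hjlt : j < w.length := (List.getElem?_eq_some_iff.mp hp).1
    have hwj : w[j] = ' ' := by
      rw [List.getElem?_eq_getElem hjlt (l := w)] at hp
      exact Option.some_inj.mp hp
    have hrj : w.reverse[w.length - 1 - j]'(by simp; omega) = ' ' := by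
      rw [List.getElem_reverse]
      have hzz : w.length - 1 - (w.length - 1 - j) = j := by omega
      simp only [hzz]
      exact hwj
    have := idxOf_le_getElem w.reverse ' ' (w.length - 1 - j) (by simp; omega) hrj
    unfold jnat at hj
    omega

lemma rev_drop_idx (w : List Char) (hjr : w.reverse.idxOf ' ' < w.length) :
    (w.reverse.drop (w.reverse.idxOf ' ' + 1)).reverse = w.take (jnat w) := by
  rw [List.drop_reverse, List.reverse_reverse]
  congr 1
  unfold jnat
  omega

lemma rev_take_idx (w : List Char) (hjr : w.reverse.idxOf ' ' < w.length) :
    (w.reverse.take (w.reverse.idxOf ' ')).reverse = w.drop (jnat w + 1) := by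
  rw [List.take_reverse, List.reverse_reverse]
  congr 1
  unfold jnat
  omega

lemma idx_lt (w : List Char) (hm : ' ' ∈ w) : w.reverse.idxOf ' ' < w.length := by
  have hmr : ' ' ∈ w.reverse := by simpa using hm
  have := List.idxOf_lt_length_of_mem hmr
  simpa using this

lemma rsplit1_eq (w : List Char) (hm : ' ' ∈ w) :
    rsplitSp w 1 = [w.take (jnat w), w.drop (jnat w + 1)] := by
  show rsplitSp w (0+1) = _
  rw [rsplitSp.eq_def]
  simp only [if_pos hm]
  rw [rsplitSp.eq_def]
  simp only [List.singleton_append]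
  rw [rev_drop_idx w (idx_lt w hm), rev_take_idx w (idx_lt w hm)]

lemma rsplit2_eq (w : List Char) (hm : ' ' ∈ w) :
    rsplitSp w 2 = rsplitSp (w.take (jnat w)) 1 ++ [w.drop (jnat w + 1)] := by
  show rsplitSp w (1+1) = _
  rw [rsplitSp.eq_def]
  simp only [if_pos hm]
  rw [rev_drop_idx w (idx_lt w hm), rev_take_idx w (idx_lt w hm)]


-- B's field extraction on the stripped line
def bParse (w : List Char) : List Char × List Char :=
  let j := PySem.Chars.rfind w [' ']
  let k := PySem.Chars.rfindFrom w [' '] 0 (some j)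
  (PySem.Chars.slice w (some (k + 1)) (some j), PySem.Chars.slice w (some (j + 1)) none)

lemma parse_eq (w : List Char) (h : msl <:+: w) :
    ((rsplitSp w 2).getD 1 [], (rsplitSp w 1).getD 1 []) = bParse w := by
  -- an occurrence of the marker gives two spaces, at offsets 3 and 9
  obtain ⟨d, hd⟩ := (infix_iff_exists_drop w msl).mp h
  have hdl : (20:Nat) ≤ w.length - d := by
    have := hd.length_le
    simpa using this
  have hd20 : d + 20 ≤ w.length := by
    rcases Nat.lt_or_ge w.length d with h' | h'
    · exfalso; omega
    · omega
  have htake := List.prefix_iff_eq_take.mp hd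
  have hocc : ∀ i : Nat, i < 20 → w[d+i]? = msl[i]? := by
    intro i hi
    have h1 : (w.drop d)[i]? = msl[i]? := by
      rw [← List.getElem?_take_of_lt (show i < msl.length from by simpa [msl] using hi) (l := w.drop d)]
      rw [← htake]
    rw [List.getElem?_drop] at h1
    exact h1
  have hp1 : w[d+3]? = some ' ' := by rw [hocc 3 (by omega)]; rfl
  have hp2 : w[d+9]? = some ' ' := by rw [hocc 9 (by omega)]; rfl
  have hm : ' ' ∈ w := List.mem_of_getElem? hp1
  -- the last space jn
  have hrf := rfind_space_eq w hm
  have hjn : jnat w < w.length := by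
    have hmr : ' ' ∈ w.reverse := by simpa using hm
    have := List.idxOf_lt_length_of_mem hmr
    unfold jnat
    simp at this
    omega
  obtain ⟨hjp, hjmax⟩ := (rfind_eq_coe_iff w [' '] (jnat w) (le_of_lt hjn)).mp hrf
  have hjn9 : d + 9 ≤ jnat w := by
    by_contra hcon
    exact hjmax (d+9) (by omega) (by omega) ((prefixChar_iff w (d+9) ' ').mpr hp2)
  -- spaces in the prefix before jn
  have hm1 : ' ' ∈ w.take (jnat w) := by
    have : (w.take (jnat w))[d+3]? = some ' ' := by
      rw [List.getElem?_take_of_lt (by omega)]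
      exact hp1
    exact List.mem_of_getElem? this
  -- both sides
  have hknr := rfind_space_eq (w.take (jnat w)) hm1
  set kn := jnat (w.take (jnat w)) with hkn
  have hBj : PySem.Chars.rfindFrom w [' '] 0 (some ((jnat w : Nat) : Int)) = (kn : Int) := by
    rw [rfindFrom_zero_some w [' '] ((jnat w : Nat) : Int) (by positivity) (by exact_mod_cast le_of_lt hjn)]
    rw [Int.toNat_natCast]
    exact hknr
  unfold bParse
  simp only [hrf, hBj]
  rw [rsplit2_eq w hm, rsplit1_eq w hm, rsplit1_eq (w.take (jnat w)) hm1]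
  rw [PySem.Chars.slice_eq_listSlice, PySem.Chars.slice_eq_listSlice]
  have hs1 := PySem.List.slice_toNat (xs := w) (a := (kn : Int) + 1) (b := ((jnat w : Nat) : Int)) (by positivity) (by positivity)
  have hs2 := PySem.List.slice_from (xs := w) (a := ((jnat w : Nat) : Int) + 1) (by positivity)
  rw [hs1, hs2]
  rw [show ((kn : Int) + 1).toNat = kn + 1 from by omega]
  rw [show (((jnat w : Nat) : Int) + 1).toNat = jnat w + 1 from by omega]
  rw [Int.toNat_natCast]
  show (_, _) = (_, _)
  rw [Prod.mk.injEq]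
  refine ⟨?_, rfl⟩
  show List.drop (kn + 1) (w.take (jnat w)) = List.take (jnat w - (kn + 1)) (List.drop (kn + 1) w)
  rw [List.drop_take]

lemma dropWhile_msl_append (b : List Char) :
    List.dropWhile PySem.Chars.isspace (msl ++ b) = msl ++ b := by
  show List.dropWhile PySem.Chars.isspace ('g' :: (msl.tail ++ b)) = _
  rw [List.dropWhile_cons_of_neg (by decide)]
  rfl

lemma dropWhile_mslrev_append (b : List Char) :
    List.dropWhile PySem.Chars.isspace (msl.reverse ++ b) = msl.reverse ++ b := by
  show List.dropWhile PySem.Chars.isspace ('0' :: (msl.reverse.tail ++ b)) = _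
  rw [List.dropWhile_cons_of_neg (by decide)]
  rfl

lemma strip_infix (s : List Char) (h : msl <:+: s) : msl <:+: PySem.Chars.strip s := by
  obtain ⟨a, b, rfl⟩ := h
  rw [PySem.Chars.strip, PySem.Chars.lstrip, PySem.Chars.rstrip]
  have key : ∀ a' : List Char,
      msl <:+: (List.dropWhile PySem.Chars.isspace (a' ++ msl ++ b).reverse).reverse := by
    intro a'
    have h1 : (a' ++ msl ++ b).reverse = b.reverse ++ (msl.reverse ++ a'.reverse) := by
      simp [List.reverse_append]
    rw [h1, List.dropWhile_append]
    split
    · rw [dropWhile_mslrev_append a'.reverse]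
      rw [List.reverse_append, List.reverse_reverse, List.reverse_reverse]
      exact ⟨a', [], by simp⟩
    · rw [List.reverse_append, List.reverse_append, List.reverse_reverse, List.reverse_reverse]
      exact ⟨a', (List.dropWhile PySem.Chars.isspace b.reverse).reverse, by simp⟩
  rw [List.append_assoc, List.dropWhile_append]
  split
  · rw [dropWhile_msl_append]
    have := key []
    simpa using this
  · have := key (List.dropWhile PySem.Chars.isspace a)
    rw [List.append_assoc] at this
    exact this

def cParse (l : List Char) : List Char × List Char :=
  let s := PySem.Chars.strip l
  ((rsplitSp s 2).getD 1 [], (rsplitSp s 1).getD 1 [])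

def stepC (acc : List Char × List Char) (l : List Char) : List Char × List Char :=
  if PySem.Chars.isIn msl l then cParse l else acc

def bCore (cs : List Char) : List Char × List Char :=
  let i := PySem.Chars.rfind cs msl
  if i = -1 then ([], [])
  else
    let e0 := PySem.Chars.findFrom cs ['\n'] i
    let e := if e0 = -1 then (cs.length : Int) else e0
    let st := PySem.Chars.rfindFrom cs ['\n'] 0 (some i) + 1
    let line := PySem.Chars.strip (PySem.Chars.slice cs (some st) (some e))
    bParse line

lemma msl_ne_nil : msl ≠ [] := by decide
lemma msl_no_newline : '\n' ∉ msl := by decide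

lemma cParse_eq_bParse_strip (l : List Char) (h : msl <:+: l) :
    cParse l = bParse (PySem.Chars.strip l) :=
  parse_eq (PySem.Chars.strip l) (strip_infix l h)

-- base case: no newline in cs
lemma bCore_no_newline (cs : List Char) (hnl : '\n' ∉ cs) :
    bCore cs = if PySem.Chars.isIn msl cs then cParse cs else ([], []) := by
  by_cases hM : PySem.Chars.isIn msl cs
  · rw [if_pos hM]
    have hinf : msl <:+: cs := (PySem.Chars.isIn_iff_infix msl cs).mp hM
    have hne : ¬ PySem.Chars.rfind cs msl = -1 := fun hc =>
      ((rfind_eq_neg_iff cs msl msl_ne_nil).mp hc) hinf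
    rcases rfind_cases cs msl with h | ⟨k, hk, hkeq⟩
    · exact absurd h hne
    · have hfe : PySem.Chars.findFrom cs ['\n'] (k : Int) = -1 := by
        rw [PySem.Chars.findFrom_natCast cs ['\n'] k hk]
        rw [if_pos (find_char_no _ _ (fun hc => hnl (List.mem_of_mem_drop hc)))]
      have hrfe : PySem.Chars.rfindFrom cs ['\n'] 0 (some (k : Int)) = -1 := by
        rw [rfindFrom_zero_some cs ['\n'] (k : Int) (by positivity) (by exact_mod_cast hk),
          Int.toNat_natCast]
        exact rfind_char_no _ '\n' (fun hc => hnl (List.mem_of_mem_take hc))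
      have hsl : PySem.Chars.slice cs (some (-1 + 1)) (some (cs.length : Int)) = cs := by
        rw [PySem.Chars.slice_eq_listSlice]
        rw [show (-1 : Int) + 1 = 0 from by ring]
        have hs := PySem.List.slice_toNat (xs := cs) (a := (0:Int)) (b := (cs.length : Int)) le_rfl (by positivity)
        rw [hs]
        simp
      simp only [bCore, hkeq, if_neg (show ¬ ((k:Int) = -1) from by omega), hfe, if_pos,
        hrfe, hsl]
      exact (cParse_eq_bParse_strip cs hinf).symm
  · rw [if_neg hM]
    have h1 : PySem.Chars.rfind cs msl = -1 := by
      rw [rfind_eq_neg_iff cs msl msl_ne_nil]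
      rw [← PySem.Chars.isIn_iff_infix]
      simpa using hM
    simp only [bCore, h1, if_pos]

lemma drop_append_sep (u v : List Char) (c : Char) (i : Nat) :
    (u ++ c :: v).drop (u.length + 1 + i) = v.drop i := by
  rw [show u.length + 1 + i = u.length + (1 + i) from by omega]
  rw [show u ++ c :: v = u ++ (c :: v) from rfl, List.drop_length_add_append]
  rw [show 1 + i = i + 1 from by omega, List.drop_succ_cons]

lemma bCore_append_match (u v : List Char) (hv : '\n' ∉ v)
    (hM : PySem.Chars.isIn msl v = true) :
    bCore (u ++ '\n' :: v) = cParse v := by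
  set s := u ++ '\n' :: v with hs
  have hlen : s.length = u.length + 1 + v.length := by simp [hs]; omega
  have hinf : msl <:+: v := (PySem.Chars.isIn_iff_infix msl v).mp hM
  have hnev : ¬ PySem.Chars.rfind v msl = -1 := fun hc =>
    ((rfind_eq_neg_iff v msl msl_ne_nil).mp hc) hinf
  rcases rfind_cases v msl with h | ⟨kv, hkv, hkveq⟩
  · exact absurd h hnev
  obtain ⟨hvp, hvmax⟩ := (rfind_eq_coe_iff v msl kv hkv).mp hkveq
  set k : Nat := u.length + 1 + kv with hkdef
  have hkle : k ≤ s.length := by omega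
  have hkeq : PySem.Chars.rfind s msl = (k : Int) := by
    rw [rfind_eq_coe_iff s msl k hkle]
    constructor
    · rw [hkdef, drop_append_sep]
      exact hvp
    · intro j hj hjl hp
      have hju : u.length + 1 ≤ j := by omega
      rw [show j = u.length + 1 + (j - u.length - 1) from by omega, drop_append_sep] at hp
      exact hvmax (j - u.length - 1) (by omega) (by omega) hp
  have hfe : PySem.Chars.findFrom s ['\n'] (k : Int) = -1 := by
    rw [PySem.Chars.findFrom_natCast s ['\n'] k hkle]
    rw [if_pos ?_]
    rw [hkdef, drop_append_sep]
    exact find_char_no _ _ (fun hc => hv (List.mem_of_mem_drop hc))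
  have htk : s.take k = u ++ '\n' :: v.take kv := by
    rw [hkdef, show u.length + 1 + kv = u.length + (1 + kv) from by omega, hs]
    rw [show u ++ '\n' :: v = u ++ ('\n' :: v) from rfl, List.take_length_add_append]
    rw [show 1 + kv = kv + 1 from by omega, List.take_succ_cons]
  have hrfe : PySem.Chars.rfindFrom s ['\n'] 0 (some (k : Int)) = (u.length : Int) := by
    rw [rfindFrom_zero_some s ['\n'] (k : Int) (by positivity) (by exact_mod_cast hkle),
      Int.toNat_natCast, htk]
    exact rfind_char_last u (v.take kv) '\n' (fun hc => hv (List.mem_of_mem_take hc))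
  have hsl : PySem.Chars.slice s (some ((u.length : Int) + 1)) (some (s.length : Int)) = v := by
    rw [PySem.Chars.slice_eq_listSlice]
    have h1 := PySem.List.slice_toNat (xs := s) (a := (u.length : Int) + 1) (b := (s.length : Int)) (by positivity) (by positivity)
    rw [h1]
    rw [show ((u.length : Int) + 1).toNat = u.length + 1 from by omega, Int.toNat_natCast]
    rw [show u.length + 1 = u.length + 1 + 0 from by omega, drop_append_sep, List.drop_zero]
    rw [hlen]
    rw [show u.length + 1 + v.length - (u.length + 1 + 0) = v.length from by omega]
    exact List.take_length
  simp only [bCore, hkeq, if_neg (show ¬ ((k:Int) = -1) from by omega), hfe, if_pos, hrfe, hsl]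
  exact (cParse_eq_bParse_strip v hinf).symm

lemma prefix_msl_left (u v : List Char) (j : Nat) (hj : j ≤ u.length) :
    msl <+: (u ++ '\n' :: v).drop j ↔ msl <+: u.drop j := by
  rw [List.drop_append_of_le_length hj]
  constructor
  · intro hp
    rcases Nat.lt_or_ge (u.drop j).length msl.length with hlt | hge
    · exfalso
      have h20 : (u.drop j).length < 20 := by simpa [msl] using hlt
      have hc : (u.drop j ++ '\n' :: v)[(u.drop j).length]? = some '\n' :=
        getElem_append_sep_self _ _ _
      have hmc : msl[(u.drop j).length]? = some '\n' := by
        have htake := List.prefix_iff_eq_take.mp hp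
        rw [htake, List.getElem?_take_of_lt (by simpa [msl] using h20)]
        exact hc
      exact msl_no_newline (List.mem_of_getElem? hmc)
    · have htake := List.prefix_iff_eq_take.mp hp
      rw [List.take_append_of_le_length hge] at htake
      rw [htake]
      exact List.take_prefix _ _
  · intro hp
    exact hp.trans (List.prefix_append _ _)

lemma rfind_msl_nomatch (u v : List Char) (hM : ¬ msl <:+: v) :
    PySem.Chars.rfind (u ++ '\n' :: v) msl = PySem.Chars.rfind u msl := by
  have htail : ∀ j : Nat, u.length < j → ¬ msl <+: (u ++ '\n' :: v).drop j := by
    intro j hj hp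
    rw [show j = u.length + 1 + (j - u.length - 1) from by omega, drop_append_sep] at hp
    exact hM ((infix_iff_exists_drop v msl).mpr ⟨j - u.length - 1, hp⟩)
  rcases rfind_cases u msl with h | ⟨k, hk, hkeq⟩
  · rw [h, rfind_eq_neg_iff _ msl msl_ne_nil, infix_iff_exists_drop]
    rintro ⟨j, hj⟩
    rcases Nat.lt_or_ge u.length j with h' | h'
    · exact htail j h' hj
    · rw [prefix_msl_left u v j h'] at hj
      exact ((rfind_eq_neg_iff u msl msl_ne_nil).mp h)
        ((infix_iff_exists_drop u msl).mpr ⟨j, hj⟩)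
  · obtain ⟨hup, humax⟩ := (rfind_eq_coe_iff u msl k hk).mp hkeq
    rw [hkeq, rfind_eq_coe_iff _ msl k (by simp; omega)]
    constructor
    · rw [prefix_msl_left u v k hk]
      exact hup
    · intro j hj hjl hp
      rcases Nat.lt_or_ge u.length j with h' | h'
      · exact htail j h' hp
      · rw [prefix_msl_left u v j h'] at hp
        exact humax j hj h' hp

lemma bCore_append_nomatch (u v : List Char) (_hv : '\n' ∉ v)
    (hM : PySem.Chars.isIn msl v = false) :
    bCore (u ++ '\n' :: v) = bCore u := by
  have hMn : ¬ msl <:+: v := by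
    intro hc
    rw [(PySem.Chars.isIn_iff_infix msl v).mpr hc] at hM
    exact Bool.true_eq_false.mp hM
  set s := u ++ '\n' :: v with hs
  have hrf := rfind_msl_nomatch u v hMn
  rw [← hs] at hrf
  rcases rfind_cases u msl with h | ⟨ku, hku, hkeq⟩
  · simp only [bCore, hrf, h, if_pos]
  obtain ⟨hup, humax⟩ := (rfind_eq_coe_iff u msl ku hku).mp hkeq
  have hku20 : ku + 20 ≤ u.length := by
    have := hup.length_le
    simp only [List.length_drop] at this
    have hml : msl.length = 20 := by decide
    omega
  have hsl : s.length = u.length + 1 + v.length := by simp [hs]; omega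
  have hds : s.drop ku = u.drop ku ++ '\n' :: v := List.drop_append_of_le_length (by omega)
  have htk : s.take ku = u.take ku := List.take_append_of_le_length (by omega)
  -- the effective end of line E
  have hfcs := find_char_sep (u.drop ku) v '\n'
  -- start-of-line value S
  have hrfs : PySem.Chars.rfindFrom s ['\n'] 0 (some ((ku:Nat) : Int)) =
      PySem.Chars.rfind (u.take ku) ['\n'] := by
    rw [rfindFrom_zero_some s ['\n'] (ku : Int) (by positivity) (by exact_mod_cast (by omega : ku ≤ s.length)), Int.toNat_natCast, htk]
  have hrfu : PySem.Chars.rfindFrom u ['\n'] 0 (some ((ku:Nat) : Int)) =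
      PySem.Chars.rfind (u.take ku) ['\n'] := by
    rw [rfindFrom_zero_some u ['\n'] (ku : Int) (by positivity) (by exact_mod_cast hku), Int.toNat_natCast]
  have hS : 0 ≤ PySem.Chars.rfind (u.take ku) ['\n'] + 1 ∧
      PySem.Chars.rfind (u.take ku) ['\n'] + 1 ≤ (ku : Int) := by
    rcases rfind_cases (u.take ku) ['\n'] with h' | ⟨k', hk', hk'eq⟩
    · rw [h']; constructor <;> omega
    · obtain ⟨hp', -⟩ := (rfind_eq_coe_iff _ _ k' hk').mp hk'eq
      rw [prefixChar_iff] at hp'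
      have : k' < (u.take ku).length := (List.getElem?_eq_some_iff.mp hp').1
      rw [List.length_take] at this
      rw [hk'eq]
      constructor <;> [positivity; (push_cast; omega)]
  -- the slices agree for any E ≤ u.length
  have hslice : ∀ E : Int, 0 ≤ E → E ≤ (u.length : Int) →
      PySem.Chars.slice s (some (PySem.Chars.rfind (u.take ku) ['\n'] + 1)) (some E) =
      PySem.Chars.slice u (some (PySem.Chars.rfind (u.take ku) ['\n'] + 1)) (some E) := by
    intro E hE0 hEl
    rw [PySem.Chars.slice_eq_listSlice, PySem.Chars.slice_eq_listSlice]
    have h1 := PySem.List.slice_toNat (xs := s) (a := PySem.Chars.rfind (u.take ku) ['\n'] + 1) (b := E) hS.1 hE0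
    have h2 := PySem.List.slice_toNat (xs := u) (a := PySem.Chars.rfind (u.take ku) ['\n'] + 1) (b := E) hS.1 hE0
    rw [h1, h2]
    have hSt : (PySem.Chars.rfind (u.take ku) ['\n'] + 1).toNat ≤ u.length := by omega
    rw [List.drop_append_of_le_length (l₂ := '\n' :: v) hSt]
    rw [List.take_append_of_le_length (by simp; omega)]
  by_cases hmem : '\n' ∈ u.drop ku
  · have hnn : (0:Int) ≤ PySem.Chars.find (u.drop ku) ['\n'] :=
      (PySem.Chars.find_nonneg_iff _ _).mpr ((singleton_infix_iff _ '\n').mpr hmem)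
    have hflen := PySem.Chars.find_le_length (u.drop ku) ['\n']
    set f : Int := PySem.Chars.find (u.drop ku) ['\n'] with hfdef
    have hfs : PySem.Chars.findFrom s ['\n'] (ku : Int) = (ku : Int) + f := by
      rw [PySem.Chars.findFrom_natCast s ['\n'] ku (by omega), hds, hfcs, if_pos hmem]
      rw [if_neg (by omega)]
    have hfu : PySem.Chars.findFrom u ['\n'] (ku : Int) = (ku : Int) + f := by
      rw [PySem.Chars.findFrom_natCast u ['\n'] ku hku]
      rw [if_neg (by omega)]
    have hEl : (ku : Int) + f ≤ (u.length : Int) := by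
      simp only [List.length_drop] at hflen
      omega
    simp only [bCore, hrf, hkeq, if_neg (show ¬ ((ku:Int) = -1) from by omega),
      hfs, hfu, if_neg (show ¬ ((ku:Int) + f = -1) from by omega), hrfs, hrfu,
      hslice ((ku:Int) + f) (by omega) hEl]
  · have hfno : PySem.Chars.find (u.drop ku) ['\n'] = -1 := find_char_no _ _ hmem
    have hfs : PySem.Chars.findFrom s ['\n'] (ku : Int) = (u.length : Int) := by
      rw [PySem.Chars.findFrom_natCast s ['\n'] ku (by omega), hds, hfcs, if_neg hmem]
      rw [if_neg (by simp)]
      simp only [List.length_drop]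
      omega
    have hfu : PySem.Chars.findFrom u ['\n'] (ku : Int) = -1 := by
      rw [PySem.Chars.findFrom_natCast u ['\n'] ku hku, if_pos hfno]
    simp only [bCore, hrf, hkeq, if_neg (show ¬ ((ku:Int) = -1) from by omega),
      hfs, hfu, if_neg (show ¬ ((u.length:Int) = -1) from by omega), hrfs, hrfu,
      hslice (u.length : Int) (by positivity) le_rfl]
    norm_num

lemma last_newline_decomp (cs : List Char) (h : '\n' ∈ cs) :
    ∃ u v, cs = u ++ '\n' :: v ∧ '\n' ∉ v := by
  induction cs with
  | nil => cases h
  | cons c r ih =>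
      by_cases hr : '\n' ∈ r
      · obtain ⟨u, v, rfl, hv⟩ := ih hr
        exact ⟨c :: u, v, rfl, hv⟩
      · have hc : c = '\n' := by
          rcases List.mem_cons.mp h with h' | h'
          · exact h'.symm
          · exact absurd h' hr
        exact ⟨[], r, by rw [hc]; rfl, hr⟩

lemma core_eq (cs : List Char) : bCore cs = (segs cs).foldl stepC ([], []) := by
  generalize hn : cs.length = n
  induction n using Nat.strong_induction_on generalizing cs with
  | _ n ih =>
      by_cases hnl : '\n' ∈ cs
      · obtain ⟨u, v, rfl, hv⟩ := last_newline_decomp cs hnl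
        rw [segs_append u v hv, List.foldl_append]
        simp only [List.foldl_cons, List.foldl_nil]
        by_cases hM : PySem.Chars.isIn msl v
        · rw [bCore_append_match u v hv hM]
          simp [stepC, hM]
        · rw [bCore_append_nomatch u v hv (by simpa using hM)]
          rw [ih u.length (by simp at hn; omega) u rfl]
          simp [stepC, hM]
      · rw [segs_no_newline cs hnl]
        simp only [List.foldl_cons, List.foldl_nil]
        rw [bCore_no_newline cs hnl]
        simp [stepC]


def liftPair (p : List Char × List Char) : String × String :=
  (String.ofList p.1, String.ofList p.2)

lemma alt_bridge (content : String) :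
    resolve_repo_address_alt content = liftPair (bCore content.toList) := by
  unfold resolve_repo_address_alt bCore bParse liftPair
  simp only [PySem.Str.slice]
  simp only [PySem.Str.rfind_eq, PySem.Str.findFrom_eq, PySem.Str.rfindFrom_eq, PySem.Str.len_eq,
    PySem.Str.toList_strip, String.toList_ofList, msl_eq,
    show ("\n":String).toList = ['\n'] from by decide,
    show (" ":String).toList = [' '] from by decide]
  by_cases hI : PySem.Chars.rfind content.toList msl = -1 <;> simp [hI]

lemma foldA (L : List String) (acc : List Char × List Char) :
    L.foldl (fun acc line =>
        if PySem.Str.isIn "git clone --depth=50" line then parseClone line else acc)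
      (liftPair acc)
      = liftPair ((L.map String.toList).foldl stepC acc) := by
  induction L generalizing acc with
  | nil => rfl
  | cons l L ih =>
      rw [List.map_cons, List.foldl_cons, List.foldl_cons]
      have hstep : (if PySem.Str.isIn "git clone --depth=50" l then parseClone l else liftPair acc)
          = liftPair (stepC acc l.toList) := by
        unfold stepC
        rw [show PySem.Str.isIn "git clone --depth=50" l
              = PySem.Chars.isIn msl l.toList from by
            rw [PySem.Str.isIn_eq, msl_eq]]
        split
        · unfold parseClone cParse liftPair
          rw [PySem.Str.toList_strip]
        · rfl
      rw [hstep, ih]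

lemma a_bridge (content : String) :
    resolve_repo_address content = liftPair ((segs content.toList).foldl stepC ([], [])) := by
  have hsp : Option.map (fun x => List.map String.toList x) (PySem.Str.split? content "\n")
      = PySem.Chars.split? content.toList ['\n'] := by
    rw [PySem.Str.split?_map]
    congr 1
  have hch : PySem.Chars.split? content.toList ['\n']
      = some (PySem.Chars.splitOn content.toList ['\n']) := by
    rw [PySem.Chars.split?]
    rw [if_neg (by simp)]
  rcases hL : PySem.Str.split? content "\n" with _ | L
  · rw [hL] at hsp
    rw [hch] at hsp
    exact absurd hsp.symm (by simp)
  · rw [hL] at hsp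
    rw [hch] at hsp
    simp only [Option.map_some, Option.some_inj] at hsp
    unfold resolve_repo_address
    rw [hL]
    show L.foldl _ (liftPair ([], [])) = _
    rw [foldA L ([], []), hsp, splitOn_eq_segs]

-- ===== VERDICT (by name: the statement is the Claim_ definition above) =====
theorem resolve_repo_address_spec : Claim_equal_resolve_repo_address := by
  intro content _
  unfold Spec_resolve_repo_address
  rw [a_bridge, alt_bridge, core_eq]
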